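-- pv_equiv track=rewrite | github.com/BlueRay2/history-production | kpi/ingest/jobs.py | _bounded_error_text
-- ===== SOURCE A (Python) =====
-- _ERROR_TEXT_MAX = 4096
--
-- def _bounded_error_text(failures: list[str]) -> str:
--     """Concatenate per-video failure strings, truncate if excessive."""
--     full = "; ".join(failures)
--     if len(full) <= _ERROR_TEXT_MAX:
--         return full
--     # Keep first N chars + summary suffix.
--     truncated = full[: _ERROR_TEXT_MAX - 80]
--     remaining = len(failures) - sum(
--         1 for i, _ in enumerate(failures)
--         if len("; ".join(failures[: i + 1])) <= _ERROR_TEXT_MAX - 80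
--     )
--     return f"{truncated}... (and {remaining} more errors, truncated)"
-- ===== SOURCE B (Python) =====
-- _ERROR_TEXT_MAX = 4096
--
-- def _bounded_error_text(failures: list[str]) -> str:
--     """Concatenate per-video failure strings, truncate if excessive."""
--     full = "; ".join(failures)
--     if len(full) <= _ERROR_TEXT_MAX:
--         return full
--     limit = _ERROR_TEXT_MAX - 80
--     # One pass over the running joined length (separator costs 2); stop at the
--     # first failure that no longer fits instead of re-joining every prefix.
--     fitting = 0
--     acc = -2
--     for f in failures:
--         acc += len(f) + 2
--         if acc > limit:
--             break
--         fitting += 1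
--     remaining = len(failures) - fitting
--     return f"{full[:limit]}... (and {remaining} more errors, truncated)"
-- ===== Notes on version B (the rewrite author's own statement) =====
-- stated objective: faster
-- what changed: Replaces the per-index re-join of every prefix (quadratic in total text length) with a single running-length pass (len(f)+2 per item, early break) to count how many failures fit before the truncation point.
import Mathlib
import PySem

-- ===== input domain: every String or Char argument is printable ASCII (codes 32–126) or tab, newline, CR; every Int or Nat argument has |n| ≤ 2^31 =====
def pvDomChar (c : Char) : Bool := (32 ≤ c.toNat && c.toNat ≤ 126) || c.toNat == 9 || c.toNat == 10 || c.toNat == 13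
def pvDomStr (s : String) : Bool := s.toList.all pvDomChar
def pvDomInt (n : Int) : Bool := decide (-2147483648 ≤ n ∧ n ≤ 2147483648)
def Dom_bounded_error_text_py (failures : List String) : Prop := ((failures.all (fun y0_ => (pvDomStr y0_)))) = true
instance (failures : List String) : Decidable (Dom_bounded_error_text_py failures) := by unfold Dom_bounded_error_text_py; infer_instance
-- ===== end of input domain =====

-- B replaces A's quadratic per-prefix re-join count by one running-length pass; return value proved equal.

-- ===== PORT A =====
def bounded_error_text_py (failures : List String) : String :=
  let full := PySem.Str.join "; " failures
  if PySem.Str.len full ≤ 4096 then full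
  else
    let truncated := PySem.Str.slice full none (some (4096 - 80))
    let remaining : Int := (failures.length : Int) -
      (PySem.List.enumerate failures).foldl
        (fun acc p =>
          if PySem.Str.len (PySem.Str.join "; " (PySem.List.slice failures none (some (p.1 + 1)))) ≤ 4096 - 80
          then acc + 1 else acc) 0
    truncated ++ "... (and " ++ PySem.Int.toStr remaining ++ " more errors, truncated)"

-- ===== PORT B =====
-- running-length loop with early break (the `for … break` of Source B)
def pvAltCount (limit : Int) : List String → Int → Int → Int
  | [], _, fitting => fitting
  | f :: rest, acc, fitting =>
    let acc' := acc + PySem.Str.len f + 2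
    if acc' > limit then fitting else pvAltCount limit rest acc' (fitting + 1)

def bounded_error_text_py_alt (failures : List String) : String :=
  let full := PySem.Str.join "; " failures
  if PySem.Str.len full ≤ 4096 then full
  else
    let limit : Int := 4096 - 80
    let fitting := pvAltCount limit failures (-2) 0
    let remaining : Int := (failures.length : Int) - fitting
    PySem.Str.slice full none (some limit) ++ "... (and " ++ PySem.Int.toStr remaining ++ " more errors, truncated)"

-- ===== PRECONDITION & SPEC =====
def Spec_bounded_error_text_py (failures : List String) (out : String) : Prop := out = bounded_error_text_py_alt failures
instance (failures : List String) (out : String) : Decidable (Spec_bounded_error_text_py failures out) := by unfold Spec_bounded_error_text_py; infer_instance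

-- ===== CLAIM (what is proved, stated in full; the proofs are below) =====
def Claim_equal_bounded_error_text_py : Prop := ∀ (failures : List String), Dom_bounded_error_text_py failures → Spec_bounded_error_text_py failures (bounded_error_text_py failures)

-- ===== LEMMAS AND PROOFS =====

-- cost of one failure inside the join: its length plus the 2-char separator
def pvCost (f : String) : Int := PySem.Str.len f + 2

-- total cost of the first k failures
def pvT (fs : List String) (k : Nat) : Int := ((fs.take k).map pvCost).sum

theorem pvCost_nonneg (f : String) : 0 ≤ pvCost f := by
  simp [pvCost, PySem.Str.len_eq]; positivity

theorem pvT_mono (fs : List String) {a b : Nat} (h : a ≤ b) : pvT fs a ≤ pvT fs b := by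
  unfold pvT
  rw [show fs.take b = (fs.take b).take a ++ (fs.take b).drop a by simp,
      List.take_take, Nat.min_eq_left h, List.map_append, List.sum_append]
  have : 0 ≤ (((fs.take b).drop a).map pvCost).sum := by
    apply List.sum_nonneg; intro x hx
    obtain ⟨f, _, rfl⟩ := List.mem_map.mp hx
    exact pvCost_nonneg f
  linarith

theorem pvT_succ (fs : List String) (s : Nat) (f : String) (rest : List String)
    (h : fs.drop s = f :: rest) : pvT fs (s + 1) = pvT fs s + pvCost f := by
  unfold pvT
  have h0 : (List.drop s fs)[0]? = fs[s + 0]? := List.getElem?_drop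
  have hf : fs[s]? = some f := by rw [h] at h0; simpa using h0.symm
  rw [List.take_add_one, hf]
  simp

theorem pvJoinChars_len : ∀ (ps : List (List Char)), ps ≠ [] →
    ((PySem.Chars.join "; ".toList ps).length : Int) = (ps.map (fun p => (p.length : Int) + 2)).sum - 2
  | [], h => absurd rfl h
  | [p], _ => by simp [PySem.Chars.join_singleton]
  | p :: q :: rest, _ => by
    rw [PySem.Chars.join_cons_cons]
    have ih := pvJoinChars_len (q :: rest) (by simp)
    simp only [List.length_append, List.map_cons, List.sum_cons] at ih ⊢
    have hsep : (("; ".toList) : List Char).length = 2 := rfl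
    rw [hsep]
    push_cast
    push_cast at ih
    omega

theorem pvJoin_len (l : List String) (h : l ≠ []) :
    PySem.Str.len (PySem.Str.join "; " l) = (l.map pvCost).sum - 2 := by
  rw [PySem.Str.len_eq, PySem.Str.toList_join]
  rw [pvJoinChars_len (l.map String.toList) (by simpa using h)]
  have hmap : (l.map String.toList).map (fun p => (p.length : Int) + 2) = l.map pvCost := by
    rw [List.map_map]
    apply List.map_congr_left
    intro f _
    simp [pvCost, PySem.Str.len_eq]
  rw [hmap]

-- A's per-index condition, rewritten through the running total
theorem pvCond_iff (fs : List String) (hfs : fs ≠ []) (j : Nat) :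
    (PySem.Str.len (PySem.Str.join "; " (PySem.List.slice fs none (some ((j : Int) + 1)))) ≤ 4096 - 80)
      ↔ pvT fs (j + 1) - 2 ≤ 4016 := by
  have hcast : ((j : Int) + 1) = ((j + 1 : Nat) : Int) := by push_cast; ring
  rw [hcast, PySem.List.slice_to_natCast]
  have hne : fs.take (j + 1) ≠ [] := by
    cases fs with
    | nil => exact absurd rfl hfs
    | cons a t => simp [List.take_succ_cons]
  rw [pvJoin_len _ hne]
  unfold pvT
  norm_num

-- once the running total exceeds the limit, the rest of A's fold adds nothing
theorem pvDead (fs : List String) (hfs : fs ≠ []) :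
    ∀ (l : List String) (s : Nat) (c : Int),
    (∀ j : Nat, s ≤ j → ¬ (pvT fs (j + 1) - 2 ≤ 4016)) →
    List.foldl
      (fun acc p =>
        if PySem.Str.len (PySem.Str.join "; " (PySem.List.slice fs none (some (p.1 + 1)))) ≤ 4096 - 80
        then acc + 1 else acc) c (PySem.List.enumerate l (s : Int)) = c
  | [], s, c, _ => by simp [PySem.List.enumerate]
  | f :: l', s, c, h => by
    rw [show PySem.List.enumerate (f :: l') (s : Int) = ((s : Int), f) :: PySem.List.enumerate l' ((s : Int) + 1) from rfl]
    rw [List.foldl_cons]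
    rw [if_neg (by rw [pvCond_iff fs hfs s]; exact h s le_rfl)]
    rw [show ((s : Int) + 1) = ((s + 1 : Nat) : Int) by push_cast; ring]
    exact pvDead fs hfs l' (s + 1) c (fun j hj => h j (by omega))

-- main loop correspondence: A's enumerate-fold counts exactly what B's break-loop counts
theorem pvMain (fs : List String) (hfs : fs ≠ []) :
    ∀ (l : List String) (s : Nat) (c fit acc : Int),
    fs.drop s = l → acc = pvT fs s - 2 →
    List.foldl
      (fun acc p =>
        if PySem.Str.len (PySem.Str.join "; " (PySem.List.slice fs none (some (p.1 + 1)))) ≤ 4096 - 80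
        then acc + 1 else acc) c (PySem.List.enumerate l (s : Int))
      = c - fit + pvAltCount 4016 l acc fit
  | [], s, c, fit, acc, _, _ => by simp [PySem.List.enumerate, pvAltCount]
  | f :: l', s, c, fit, acc, hdrop, hacc => by
    have hacc' : acc + PySem.Str.len f + 2 = pvT fs (s + 1) - 2 := by
      rw [hacc, pvT_succ fs s f l' hdrop]; unfold pvCost; ring
    have hdrop' : fs.drop (s + 1) = l' := by
      rw [← List.tail_drop, hdrop]; rfl
    rw [show PySem.List.enumerate (f :: l') (s : Int) = ((s : Int), f) :: PySem.List.enumerate l' ((s : Int) + 1) from rfl]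
    rw [List.foldl_cons]
    rw [show pvAltCount 4016 (f :: l') acc fit
        = if acc + PySem.Str.len f + 2 > 4016 then fit
          else pvAltCount 4016 l' (acc + PySem.Str.len f + 2) (fit + 1) from rfl]
    by_cases hle : pvT fs (s + 1) - 2 ≤ 4016
    · rw [if_pos ((pvCond_iff fs hfs s).mpr hle)]
      rw [if_neg (by omega)]
      rw [show ((s : Int) + 1) = ((s + 1 : Nat) : Int) by push_cast; ring]
      rw [pvMain fs hfs l' (s + 1) (c + 1) (fit + 1) (acc + PySem.Str.len f + 2) hdrop' (by omega)]
      ring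
    · rw [if_neg (by rw [pvCond_iff fs hfs s]; exact hle)]
      rw [if_pos (by omega)]
      rw [show ((s : Int) + 1) = ((s + 1 : Nat) : Int) by push_cast; ring]
      rw [pvDead fs hfs l' (s + 1) c
        (fun j hj hle' => hle (by
          have := pvT_mono fs (a := s + 1) (b := j + 1) (by omega)
          omega))]
      ring

theorem pvEmpty_len : PySem.Str.len (PySem.Str.join "; " ([] : List String)) = 0 := by
  rw [PySem.Str.len_eq, PySem.Str.toList_join]
  simp [PySem.Chars.join_nil]

-- ===== VERDICT (by name: the statement is the Claim_ definition above) =====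
theorem bounded_error_text_py_spec : Claim_equal_bounded_error_text_py := by
  intro fs _
  unfold Spec_bounded_error_text_py bounded_error_text_py bounded_error_text_py_alt
  simp only []
  by_cases h : PySem.Str.len (PySem.Str.join "; " fs) ≤ 4096
  · rw [if_pos h, if_pos h]
  · rw [if_neg h, if_neg h]
    have hfs : fs ≠ [] := by
      intro hnil; subst hnil
      exact h (by rw [pvEmpty_len]; norm_num)
    have := pvMain fs hfs fs 0 0 0 (-2) List.drop_zero (by unfold pvT; norm_num)
    simp only [Nat.cast_zero] at this
    rw [this]
    ring_nf
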